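-- pv_equiv track=rewrite | github.com/Caaraya/py-asset-gen | save_blop.py | get_quadranted_array
-- ===== SOURCE A (Python) =====
-- import math
--
-- def nearest_sq(n):
--   return round(math.sqrt(n))
--
-- def get_quadranted_array(nodes):
--     r,l = 0,0
--     n_sq = nearest_sq(nodes)
--     arr = []
--     for i in range(nodes):
--       arr.append([l,r])
--       if (r == n_sq - 1):
--         l += 1
--         r = 0
--       else:
--         r += 1
--     return arr
-- ===== SOURCE B (Python) =====
-- import math
--
-- def get_quadranted_array(nodes):
--     # Build the quadrant grid row by row: all full rows of width w, then the
--     # partial last row, instead of running per-element counters.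
--     if nodes == 0:
--         return []
--     m = math.isqrt(nodes)
--     w = m + 1 if nodes - m * m > m else m
--     full, rem = divmod(nodes, w)
--     arr = []
--     for l in range(full):
--         arr += [[l, r] for r in range(w)]
--     arr += [[full, r] for r in range(rem)]
--     return arr
-- ===== Notes on version B (the rewrite author's own statement) =====
-- stated objective: alternative
-- what changed: B builds the result in staged row blocks: it computes full, rem = divmod(nodes, w) once, emits each complete row of width w as a unit and then the partial last row, eliminating A's per-element wrap-around counter state machine (and uses exact math.isqrt instead of float sqrt).
import Mathlib
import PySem

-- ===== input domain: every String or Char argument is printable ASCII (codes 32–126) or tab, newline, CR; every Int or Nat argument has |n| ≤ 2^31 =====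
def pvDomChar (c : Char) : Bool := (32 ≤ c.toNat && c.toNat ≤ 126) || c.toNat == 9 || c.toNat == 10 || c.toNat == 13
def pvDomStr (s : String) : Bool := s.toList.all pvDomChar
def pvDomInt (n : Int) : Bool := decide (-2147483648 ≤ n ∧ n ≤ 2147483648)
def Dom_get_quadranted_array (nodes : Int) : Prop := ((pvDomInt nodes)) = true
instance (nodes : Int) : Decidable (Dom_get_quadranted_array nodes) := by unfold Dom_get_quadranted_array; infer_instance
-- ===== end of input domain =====

-- B builds the grid in staged row blocks (full rows then the partial last row, counts
-- from a single divmod) instead of A's per-element wrap-around counter state machine.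

-- ===== PORT A =====
-- round(math.sqrt(n)): exact for 0 ≤ n ≤ 2^31 (float sqrt error is far below the
-- distance to any half-integer there), so ported as nearest-integer square root.
def nearest_sq (n : Int) : Int :=
  let m : Int := (Int.toNat n).sqrt
  if n - m * m > m then m + 1 else m

def get_quadranted_array (nodes : Int) : List (List Int) :=
  let n_sq := nearest_sq nodes
  let s := (PySem.List.pyRange 0 nodes 1).foldl
    (fun (s : Int × Int × List (List Int)) _i =>
      let arr := s.2.2 ++ [[s.1, s.2.1]]
      if s.2.1 == n_sq - 1 then (s.1 + 1, 0, arr) else (s.1, s.2.1 + 1, arr))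
    (0, 0, [])
  s.2.2

-- ===== PORT B =====
-- Source B: guard nodes == 0, math.isqrt + rounding correction, full/rem = divmod(nodes, w),
-- then whole rows appended as blocks and finally the partial last row.
def get_quadranted_array_alt (nodes : Int) : List (List Int) :=
  if nodes == 0 then []
  else
    let m : Int := (Int.toNat nodes).sqrt
    let w := if nodes - m * m > m then m + 1 else m
    -- divmod(nodes, w): w > 0 whenever this branch is reached with 0 < nodes
    let full := PySem.Int.floordiv nodes w
    let rem := PySem.Int.mod nodes w
    let arr := (PySem.List.pyRange 0 full 1).foldl
      (fun arr l => arr ++ (PySem.List.pyRange 0 w 1).map (fun r => [l, r])) []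
    arr ++ (PySem.List.pyRange 0 rem 1).map (fun r => [full, r])

-- ===== PRECONDITION & SPEC =====
-- Pre_ excludes negative nodes, on which A raises ValueError (math.sqrt of a negative).
def Pre_get_quadranted_array (nodes : Int) : Prop := 0 ≤ nodes
instance (nodes : Int) : Decidable (Pre_get_quadranted_array nodes) := by unfold Pre_get_quadranted_array; infer_instance
def pvWitness_get_quadranted_array : Int := 5

def Spec_get_quadranted_array (nodes : Int) (out : List (List Int)) : Prop := out = get_quadranted_array_alt nodes
instance (nodes : Int) (out : List (List Int)) : Decidable (Spec_get_quadranted_array nodes out) := by unfold Spec_get_quadranted_array; infer_instance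

-- ===== CLAIM (what is proved, stated in full; the proofs are below) =====
def Claim_equal_get_quadranted_array : Prop := ∀ (nodes : Int), Dom_get_quadranted_array nodes → Pre_get_quadranted_array nodes → Spec_get_quadranted_array nodes (get_quadranted_array nodes)

-- ===== LEMMAS AND PROOFS =====

-- division/mod characterisation used on both sides
theorem pv_divmod_char (q d r : Int) (h0 : 0 ≤ r) (h1 : r < q) :
    (q * d + r) / q = d ∧ (q * d + r) % q = r := by
  have hq : q ≠ 0 := by omega
  constructor
  · rw [add_comm, mul_comm q d, Int.add_mul_ediv_right r d hq, Int.ediv_eq_zero_of_lt h0 h1]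
    omega
  · rw [add_comm, Int.add_mul_emod_self_left, Int.emod_eq_of_lt h0 h1]

-- A's loop invariant: state after k steps is (k/q, k%q, the divmod table)
theorem pv_loopA (q : Int) (hq : 1 ≤ q) (k : Nat) :
    (PySem.List.pyRange 0 (k : Int) 1).foldl
      (fun (s : Int × Int × List (List Int)) _i =>
        let arr := s.2.2 ++ [[s.1, s.2.1]]
        if s.2.1 == q - 1 then (s.1 + 1, 0, arr) else (s.1, s.2.1 + 1, arr))
      (0, 0, []) =
    ((k : Int) / q, (k : Int) % q,
      (PySem.List.pyRange 0 (k : Int) 1).map (fun i => [i / q, i % q])) := by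
  induction k with
  | zero => simp [PySem.List.pyRange_one_eq_nil]
  | succ n ih =>
    have hsp : ((n + 1 : Nat) : Int) = (n : Int) + 1 := by push_cast; ring
    rw [hsp, PySem.List.pyRange_one_succ_right (by positivity), List.foldl_append,
      List.map_append, ih]
    have hr0 : 0 ≤ (n : Int) % q := Int.emod_nonneg _ (by omega)
    have hr1 : (n : Int) % q < q := Int.emod_lt_of_pos _ (by omega)
    have hdm : q * ((n : Int) / q) + (n : Int) % q = (n : Int) := Int.ediv_add_emod _ _
    by_cases hcase : (n : Int) % q = q - 1
    · have h1 : ((n : Int) + 1) / q = (n : Int) / q + 1 ∧ ((n : Int) + 1) % q = 0 := by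
        have := pv_divmod_char q ((n : Int) / q + 1) 0 le_rfl (by omega)
        constructor
        · rw [show (n : Int) + 1 = q * ((n : Int) / q + 1) + 0 by ring_nf; omega]
          exact this.1
        · rw [show (n : Int) + 1 = q * ((n : Int) / q + 1) + 0 by ring_nf; omega]
          exact this.2
      simp only [List.foldl_cons, List.foldl_nil, List.map_cons, List.map_nil,
        beq_iff_eq, hcase, h1.1, h1.2]
      simp
    · have h1 : ((n : Int) + 1) / q = (n : Int) / q ∧ ((n : Int) + 1) % q = (n : Int) % q + 1 := by
        have := pv_divmod_char q ((n : Int) / q) ((n : Int) % q + 1) (by omega) (by omega)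
        constructor
        · rw [show (n : Int) + 1 = q * ((n : Int) / q) + ((n : Int) % q + 1) by omega]
          exact this.1
        · rw [show (n : Int) + 1 = q * ((n : Int) / q) + ((n : Int) % q + 1) by omega]
          exact this.2
      simp only [List.foldl_cons, List.foldl_nil, List.map_cons, List.map_nil,
        beq_iff_eq, if_neg hcase, h1.1, h1.2]

-- the divmod table over a block of full rows IS the row-by-row construction
theorem pv_full_rows (q : Int) (hq : 1 ≤ q) (F : Nat) :
    (List.range (q.toNat * F)).map (fun i : Nat => [(i : Int) / q, (i : Int) % q]) =
    (List.range F).flatMap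
      (fun l : Nat => (List.range q.toNat).map (fun r : Nat => [(l : Int), (r : Int)])) := by
  induction F with
  | zero => simp
  | succ n ih =>
    rw [Nat.mul_succ, List.range_add, List.map_append, ih, List.range_succ,
      List.flatMap_append, List.map_map]
    congr 1
    simp only [List.flatMap_cons, List.flatMap_nil, List.append_nil]
    refine List.map_congr_left (fun r hr => ?_)
    have hr' : r < q.toNat := List.mem_range.mp hr
    have hcast : ((q.toNat * n + r : Nat) : Int) = q * (n : Int) + (r : Int) := by
      push_cast; rw [Int.toNat_of_nonneg (by omega)]
    have hdc := pv_divmod_char q (n : Int) (r : Int) (by positivity)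
      (by have : (r : Int) < (q.toNat : Int) := by exact_mod_cast hr'
          rwa [Int.toNat_of_nonneg (by omega)] at this)
    simp [Function.comp, hcast, hdc.1, hdc.2]

-- the divmod table equals B's block construction
theorem pv_table_eq_blocks (q : Int) (hq : 1 ≤ q) (k : Nat) :
    (PySem.List.pyRange 0 (k : Int) 1).map (fun i => [i / q, i % q]) =
    (PySem.List.pyRange 0 ((k : Int) / q) 1).foldl
      (fun arr l => arr ++ (PySem.List.pyRange 0 q 1).map (fun r => [l, r])) []
    ++ (PySem.List.pyRange 0 ((k : Int) % q) 1).map (fun r => [(k : Int) / q, r]) := by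
  rw [PySem.List.foldl_append_eq_flatMap, List.nil_append]
  have hq0 : 0 ≤ (k : Int) / q := Int.ediv_nonneg (by positivity) (by omega)
  have hr0 : 0 ≤ (k : Int) % q := Int.emod_nonneg _ (by omega)
  have hr1 : (k : Int) % q < q := Int.emod_lt_of_pos _ (by omega)
  obtain ⟨F, hF⟩ : ∃ F : Nat, (k : Int) / q = (F : Int) := ⟨((k : Int) / q).toNat, by omega⟩
  obtain ⟨R, hR⟩ : ∃ R : Nat, (k : Int) % q = (R : Int) := ⟨((k : Int) % q).toNat, by omega⟩
  have hqn : ((q.toNat : Nat) : Int) = q := Int.toNat_of_nonneg (by omega)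
  have hsplit : k = q.toNat * F + R := by
    have h := Int.ediv_add_emod (k : Int) q
    rw [hF, hR] at h
    have h2 : ((q.toNat * F + R : Nat) : Int) = (k : Int) := by push_cast; rw [hqn]; linarith
    exact_mod_cast h2.symm
  have hw : PySem.List.pyRange 0 q 1 = (List.range q.toNat).map (fun r : Nat => (r : Int)) := by
    rw [← hqn, PySem.List.pyRange_zero_natCast, Int.toNat_natCast]
  rw [hF, hR, hw, PySem.List.pyRange_zero_natCast, PySem.List.pyRange_zero_natCast,
    PySem.List.pyRange_zero_natCast, List.flatMap_map]
  conv_lhs => rw [hsplit]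
  rw [List.range_add]
  simp only [List.map_append, List.map_map, Function.comp_def]
  congr 1
  · simpa using pv_full_rows q hq F
  · refine List.map_congr_left (fun r hr => ?_)
    have hr' : r < R := List.mem_range.mp hr
    have hcast : ((q.toNat * F + r : Nat) : Int) = q * (F : Int) + (r : Int) := by
      push_cast; rw [hqn]
    have hdc := pv_divmod_char q (F : Int) (r : Int) (by positivity)
      (by have : (r : Int) < (R : Int) := by exact_mod_cast hr'
          omega)
    simp [Function.comp, hcast, hdc.1, hdc.2]

-- A's port evaluates to the divmod table (for 1 ≤ nearest_sq nodes)
theorem pv_A_eval (k : Nat) (hq : 1 ≤ nearest_sq (k : Int)) :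
    get_quadranted_array (k : Int) =
    (PySem.List.pyRange 0 (k : Int) 1).map
      (fun i => [i / nearest_sq (k : Int), i % nearest_sq (k : Int)]) := by
  unfold get_quadranted_array
  simp only [pv_loopA (nearest_sq (k : Int)) hq k]

-- B's port evaluates to the block construction (for nodes ≠ 0)
theorem pv_B_eval (k : Nat) (hk : k ≠ 0) (hq : 1 ≤ nearest_sq (k : Int)) :
    get_quadranted_array_alt (k : Int) =
    (PySem.List.pyRange 0 ((k : Int) / nearest_sq (k : Int)) 1).foldl
      (fun arr l => arr ++ (PySem.List.pyRange 0 (nearest_sq (k : Int)) 1).map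
        (fun r => [l, r])) []
    ++ (PySem.List.pyRange 0 ((k : Int) % nearest_sq (k : Int)) 1).map
        (fun r => [(k : Int) / nearest_sq (k : Int), r]) := by
  have hkz : (((k : Int)) == 0) = false := by
    simp [hk]
  unfold get_quadranted_array_alt nearest_sq
  rw [hkz]
  simp only [Bool.false_eq_true, if_false]
  rw [PySem.Int.floordiv_eq_ediv_of_pos, PySem.Int.mod_eq_emod_of_pos]
  · unfold nearest_sq at hq
    simp only at hq ⊢
    split at hq <;> simp_all <;> omega
  · unfold nearest_sq at hq
    simp only at hq ⊢
    split at hq <;> simp_all <;> omega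

theorem get_quadranted_array_spec : Claim_equal_get_quadranted_array := by
  intro nodes _hdom hpre
  obtain ⟨k, rfl⟩ : ∃ k : Nat, nodes = (k : Int) :=
    ⟨Int.toNat nodes, by unfold Pre_get_quadranted_array at hpre; omega⟩
  unfold Spec_get_quadranted_array
  by_cases hz : k = 0
  · subst hz
    unfold get_quadranted_array get_quadranted_array_alt
    simp [PySem.List.pyRange_one_eq_nil]
  · have hq : 1 ≤ nearest_sq (k : Int) := by
      unfold nearest_sq
      have h1 : 0 < (Int.toNat (k : Int)).sqrt := Nat.sqrt_pos.mpr (by omega)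
      have h2 : (1 : Int) ≤ ((Int.toNat (k : Int)).sqrt : Int) := by exact_mod_cast h1
      simp only
      split <;> omega
    rw [pv_A_eval k hq, pv_B_eval k hz hq, pv_table_eq_blocks (nearest_sq (k : Int)) hq k]
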